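-- pv_equiv track=rewrite | github.com/kiritka-jain/My-programs | funny_string.py | funny_strings
-- ===== SOURCE A (Python) =====
-- def funny_strings(string):
--     string_len = len(string)
--     diff_list = []
--     for index in range(string_len-1):
--         difference = abs(ord(string[index+1])-ord(string[index]))
--         diff_list.append(difference)
--     new_list = list(reversed(diff_list))
--     if new_list == diff_list:
--         return "Funny"
--     else:
--         return "Not Funny"
-- ===== SOURCE B (Python) =====
-- def funny_strings(string):
--     n = len(string)
--     for i in range(1, n):
--         if abs(ord(string[i]) - ord(string[i - 1])) != abs(ord(string[n - i]) - ord(string[n - i - 1])):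
--             return "Not Funny"
--     return "Funny"
-- ===== Notes on version B (the rewrite author's own statement) =====
-- stated objective: simpler
-- what changed: B never builds the difference list or its reversed copy: it walks the string once from both ends, comparing the adjacent-difference at i with the mirrored one at n-i, and exits early on the first mismatch.
import Mathlib
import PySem

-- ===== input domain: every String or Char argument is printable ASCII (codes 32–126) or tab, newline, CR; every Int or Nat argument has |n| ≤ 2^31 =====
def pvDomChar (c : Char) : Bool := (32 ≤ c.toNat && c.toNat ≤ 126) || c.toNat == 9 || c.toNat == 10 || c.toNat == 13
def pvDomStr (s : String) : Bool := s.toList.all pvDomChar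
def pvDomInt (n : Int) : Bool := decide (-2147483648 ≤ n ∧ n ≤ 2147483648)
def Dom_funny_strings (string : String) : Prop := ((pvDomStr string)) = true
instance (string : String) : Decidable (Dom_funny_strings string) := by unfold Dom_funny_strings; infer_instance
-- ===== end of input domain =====

-- B replaces A's diff-list + reversed-copy comparison by a single two-ended pass with early exit (objective: simpler).

-- ===== PORT A =====
-- Every index range(n-1) produces is in bounds, so the getD default ' ' is never read; exact there.
def funny_strings (string : String) : String :=
  let cs := string.toList
  let string_len := cs.length
  let diff_list := (List.range (string_len - 1)).foldl
    (fun acc index =>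
      acc ++ [(((cs.getD (index + 1) ' ').toNat : Int) - ((cs.getD index ' ').toNat : Int)).natAbs])
    ([] : List Nat)
  let new_list := diff_list.reverse
  if new_list = diff_list then "Funny" else "Not Funny"

-- ===== PORT B =====
-- Indices i, i-1, n-i, n-i-1 are in bounds whenever the guard i < n holds (with 1 ≤ i), so getD's default is never read.
def funny_strings_alt_loop (cs : List Char) (n i : Nat) : String :=
  if h : i < n then
    if (((cs.getD i ' ').toNat : Int) - ((cs.getD (i - 1) ' ').toNat : Int)).natAbs
        ≠ (((cs.getD (n - i) ' ').toNat : Int) - ((cs.getD (n - i - 1) ' ').toNat : Int)).natAbs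
    then "Not Funny"
    else funny_strings_alt_loop cs n (i + 1)
  else "Funny"
termination_by n - i

def funny_strings_alt (string : String) : String :=
  funny_strings_alt_loop string.toList string.toList.length 1

-- ===== PRECONDITION & SPEC =====
def Spec_funny_strings (string : String) (out : String) : Prop := out = funny_strings_alt string
instance (string : String) (out : String) : Decidable (Spec_funny_strings string out) := by unfold Spec_funny_strings; infer_instance

-- ===== CLAIM (what is proved, stated in full; the proofs are below) =====
def Claim_equal_funny_strings : Prop := ∀ (string : String), Dom_funny_strings string → Spec_funny_strings string (funny_strings string)

-- ===== LEMMAS AND PROOFS =====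

-- adjacent difference between positions j and j+1 (A's diff_list entry j)
def pvF (cs : List Char) (j : Nat) : Nat :=
  (((cs.getD (j + 1) ' ').toNat : Int) - ((cs.getD j ' ').toNat : Int)).natAbs

-- B's comparison value at position k
def pvE (cs : List Char) (k : Nat) : Nat :=
  (((cs.getD k ' ').toNat : Int) - ((cs.getD (k - 1) ' ').toNat : Int)).natAbs

theorem pvE_eq_pvF (cs : List Char) (j : Nat) : pvE cs (j + 1) = pvF cs j := by
  simp [pvE, pvF]

theorem pv_foldl_app {α β : Type} (f : α → β) :
    ∀ (l : List α) (acc : List β),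
      l.foldl (fun a x => a ++ [f x]) acc = acc ++ l.map f := by
  intro l
  induction l with
  | nil => simp
  | cons x xs ih => intro acc; simp [List.foldl, ih]

theorem pv_palindrome_iff {α : Type} (l : List α) :
    (l.reverse = l) ↔ ∀ j (h : j < l.length), l[j] = l[l.length - 1 - j]'(by omega) := by
  constructor
  · intro hrev j hj
    rw [← List.getElem_of_eq hrev (by simpa using hj), List.getElem_reverse]
  · intro h
    apply List.ext_getElem (by simp)
    intro i h1 h2
    rw [List.getElem_reverse]
    have := h (l.length - 1 - i) (by omega)
    have hidx : l.length - 1 - (l.length - 1 - i) = i := by omega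
    simp only [hidx] at this
    exact this

theorem funny_strings_char (string : String) :
    funny_strings string =
      if ∀ j, j < string.toList.length - 1 →
          pvF string.toList j = pvF string.toList (string.toList.length - 1 - 1 - j)
      then "Funny" else "Not Funny" := by
  show (if ((List.range (string.toList.length - 1)).foldl
      (fun acc index =>
        acc ++ [(((string.toList.getD (index + 1) ' ').toNat : Int) -
          ((string.toList.getD index ' ').toNat : Int)).natAbs])
      ([] : List Nat)).reverse =
      (List.range (string.toList.length - 1)).foldl
      (fun acc index =>
        acc ++ [(((string.toList.getD (index + 1) ' ').toNat : Int) -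
          ((string.toList.getD index ' ').toNat : Int)).natAbs])
      ([] : List Nat)
    then "Funny" else "Not Funny") = _
  rw [pv_foldl_app]
  simp only [List.nil_append]
  rw [show ((List.range (string.toList.length - 1)).map (fun index =>
      (((string.toList.getD (index + 1) ' ').toNat : Int) -
        ((string.toList.getD index ' ').toNat : Int)).natAbs)) =
      (List.range (string.toList.length - 1)).map (pvF string.toList) from rfl]
  congr 1
  rw [pv_palindrome_iff]
  simp only [List.length_map, List.length_range, List.getElem_map, List.getElem_range]

theorem funny_strings_alt_loop_char (cs : List Char) (n : Nat) :
    ∀ fuel i, n - i = fuel →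
      funny_strings_alt_loop cs n i =
        if ∀ k, i ≤ k → k < n → pvE cs k = pvE cs (n - k)
        then "Funny" else "Not Funny" := by
  intro fuel
  induction fuel with
  | zero =>
    intro i hfi
    unfold funny_strings_alt_loop
    rw [dif_neg (by omega), if_pos (by intro k hk1 hk2; omega)]
  | succ m ih =>
    intro i hfi
    unfold funny_strings_alt_loop
    by_cases hin : i < n
    · rw [dif_pos hin]
      by_cases heq : pvE cs i = pvE cs (n - i)
      · rw [if_neg (by simpa [pvE] using heq)]
        rw [ih (i + 1) (by omega)]
        congr 1
        apply propext
        constructor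
        · intro h k hk1 hk2
          rcases Nat.eq_or_lt_of_le hk1 with rfl | hlt
          · exact heq
          · exact h k hlt hk2
        · intro h k hk1 hk2
          exact h k (by omega) hk2
      · rw [if_pos (by simpa [pvE] using heq)]
        rw [if_neg]
        intro hall
        exact heq (hall i le_rfl hin)
    · rw [dif_neg hin, if_pos (by intro k hk1 hk2; omega)]

theorem pv_bridge (cs : List Char) :
    (∀ j, j < cs.length - 1 → pvF cs j = pvF cs (cs.length - 1 - 1 - j)) ↔
    (∀ k, 1 ≤ k → k < cs.length → pvE cs k = pvE cs (cs.length - k)) := by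
  constructor
  · intro h k hk1 hk2
    have hj := h (k - 1) (by omega)
    have e1 : pvE cs k = pvF cs (k - 1) := by
      have h1 := pvE_eq_pvF cs (k - 1)
      rwa [show (k - 1) + 1 = k from by omega] at h1
    have e2 : pvE cs (cs.length - k) = pvF cs (cs.length - k - 1) := by
      have h2 := pvE_eq_pvF cs (cs.length - k - 1)
      rwa [show (cs.length - k - 1) + 1 = cs.length - k from by omega] at h2
    rw [e1, e2, show cs.length - 1 - 1 - (k - 1) = cs.length - k - 1 from by omega] at *
    exact hj
  · intro h j hj
    have hk := h (j + 1) (by omega) (by omega)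
    rw [pvE_eq_pvF] at hk
    have e2 : pvE cs (cs.length - (j + 1)) = pvF cs (cs.length - 1 - 1 - j) := by
      have h2 := pvE_eq_pvF cs (cs.length - 1 - 1 - j)
      rwa [show (cs.length - 1 - 1 - j) + 1 = cs.length - (j + 1) from by omega] at h2
    rw [e2] at hk
    exact hk

-- ===== VERDICT (by name: the statement is the Claim_ definition above) =====
theorem funny_strings_spec : Claim_equal_funny_strings := by
  intro string _
  unfold Spec_funny_strings funny_strings_alt
  rw [funny_strings_char,
    funny_strings_alt_loop_char string.toList string.toList.length
      (string.toList.length - 1) 1 rfl]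
  congr 1
  exact propext (pv_bridge string.toList)
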